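-- pv_equiv track=rewrite | github.com/grupoprojetomd/projeto-criptografia | modulos/findXandYCoefficients.py | findXYCoefficients
-- ===== SOURCE A (Python) =====
-- def findXYCoefficients(listOfQuotients, listOfCoefficients, iterator, finalListOfCoefficients):
--     isPenultimateCoefficient = (len(listOfQuotients) - 2) == iterator
--     isLastCoefficient = (len(listOfQuotients)- 1) == iterator
--
--     if (listOfCoefficients == [1]):
--
--         nextCoefficient = listOfQuotients[iterator] * 1
--
--         listOfCoefficients.append(nextCoefficient)
--
--         if (isPenultimateCoefficient):
--             finalListOfCoefficients.append(nextCoefficient)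
--         elif (isLastCoefficient):
--             finalListOfCoefficients.append(nextCoefficient * (-1))
--
--         return findXYCoefficients(listOfQuotients, listOfCoefficients, iterator + 1, finalListOfCoefficients)
--
--
--     nextCoefficient = (listOfQuotients[iterator] * listOfCoefficients[iterator]) + listOfCoefficients[iterator - 1] # 1
--
--     if (isPenultimateCoefficient):
--         finalListOfCoefficients.append(nextCoefficient)
--     elif (isLastCoefficient):
--         finalListOfCoefficients.append(nextCoefficient)
--
--         isCoefficientsQuantityEven = len(listOfQuotients) % 2 == 0
--
--         if (isCoefficientsQuantityEven):
--             finalListOfCoefficients[0] *= -1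
--         else:
--             finalListOfCoefficients[1] *= -1
--
--         return finalListOfCoefficients
--
--     listOfCoefficients.append(nextCoefficient)
--
--     return findXYCoefficients(listOfQuotients, listOfCoefficients, iterator + 1, finalListOfCoefficients)
-- ===== SOURCE B (Python) =====
-- def findXYCoefficients(listOfQuotients, listOfCoefficients, iterator, finalListOfCoefficients):
--     # Iterative re-implementation: handle the [1] seed case once, then a single
--     # for-loop over the remaining iterators, then the last coefficient + sign flip.
--     # Mutates listOfCoefficients and finalListOfCoefficients in place, like A.
--     n = len(listOfQuotients)
--     if listOfCoefficients == [1]: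
--         nextCoefficient = listOfQuotients[iterator]
--         listOfCoefficients.append(nextCoefficient)
--         if iterator == n - 2:
--             finalListOfCoefficients.append(nextCoefficient)
--         elif iterator == n - 1:
--             finalListOfCoefficients.append(-nextCoefficient)
--         iterator += 1
--     for j in range(iterator, n - 1):
--         nextCoefficient = listOfQuotients[j] * listOfCoefficients[j] + listOfCoefficients[j - 1]
--         if j == n - 2:
--             finalListOfCoefficients.append(nextCoefficient)
--         listOfCoefficients.append(nextCoefficient)
--     lastCoefficient = listOfQuotients[n - 1] * listOfCoefficients[n - 1] + listOfCoefficients[n - 2]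
--     finalListOfCoefficients.append(lastCoefficient)
--     finalListOfCoefficients[n % 2] *= -1
--     return finalListOfCoefficients
-- ===== Notes on version B (the rewrite author's own statement) =====
-- stated objective: simpler
-- what changed: Replaces A's tail recursion (which re-tests the [1] seed case and both boundary predicates on every call) with a straight-line shape: the [1] seed handled once, one for-loop over range(iterator, n-1), and the last coefficient plus a single final[n % 2] sign flip computed after the loop.
import Mathlib
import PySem

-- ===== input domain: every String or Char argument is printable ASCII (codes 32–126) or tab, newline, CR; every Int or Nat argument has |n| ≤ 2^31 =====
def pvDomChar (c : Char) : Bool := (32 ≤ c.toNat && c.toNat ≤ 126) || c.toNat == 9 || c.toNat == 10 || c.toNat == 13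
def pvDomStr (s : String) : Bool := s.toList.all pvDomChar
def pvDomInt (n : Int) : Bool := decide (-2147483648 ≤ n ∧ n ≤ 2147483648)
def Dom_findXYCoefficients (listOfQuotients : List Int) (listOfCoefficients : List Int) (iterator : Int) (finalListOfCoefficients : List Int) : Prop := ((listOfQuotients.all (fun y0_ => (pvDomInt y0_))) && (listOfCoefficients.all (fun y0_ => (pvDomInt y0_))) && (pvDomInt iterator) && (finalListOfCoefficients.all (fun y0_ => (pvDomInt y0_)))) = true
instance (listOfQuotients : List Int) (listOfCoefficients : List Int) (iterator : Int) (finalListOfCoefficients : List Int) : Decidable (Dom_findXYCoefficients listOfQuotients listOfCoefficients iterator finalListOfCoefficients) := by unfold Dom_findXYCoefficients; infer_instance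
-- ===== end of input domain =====

-- B replaces A's tail recursion by a straight-line loop (seed case once, one for-loop, final sign flip);
-- both mutate the two list arguments in place in Python — the equivalence proved here is about the return value.

-- ===== PORT A =====
-- a successful Python index means the index is in range (cited by the port's termination proof)
lemma pyGet?_int_some_bounds {xs : List Int} {i v : Int} (h : PySem.List.pyGet? xs i = some v) :
    -(xs.length : Int) ≤ i ∧ i < (xs.length : Int) := by
  have hn := PySem.List.pyGet?_eq_none_iff (xs := xs) (i := i)
  by_contra hc
  have : ¬ PySem.Raise.InRange xs.length i := by
    simp only [PySem.Raise.InRange]; omega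
  simp [hn.mpr this] at h

-- `f[i] *= -1` (nonnegative literal index i; none = IndexError, ported as [])
def pyNegAtA (f : List Int) (i : Nat) : List Int :=
  match f[i]? with
  | none => []
  | some v => f.set i (v * -1)

def findXYCoefficients (listOfQuotients : List Int) (listOfCoefficients : List Int) (iterator : Int) (finalListOfCoefficients : List Int) : List Int :=
  let n : Int := listOfQuotients.length
  let isPenultimateCoefficient : Bool := n - 2 == iterator
  let isLastCoefficient : Bool := n - 1 == iterator
  if listOfCoefficients == [1] then
    match hq : PySem.List.pyGet? listOfQuotients iterator with
    | none => []  -- IndexError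
    | some qi =>
      let nextCoefficient := qi * 1
      let c' := listOfCoefficients ++ [nextCoefficient]
      let f' := if isPenultimateCoefficient then finalListOfCoefficients ++ [nextCoefficient]
                else if isLastCoefficient then finalListOfCoefficients ++ [nextCoefficient * (-1)]
                else finalListOfCoefficients
      findXYCoefficients listOfQuotients c' (iterator + 1) f'
  else
    match hq : PySem.List.pyGet? listOfQuotients iterator,
          PySem.List.pyGet? listOfCoefficients iterator,
          PySem.List.pyGet? listOfCoefficients (iterator - 1) with
    | some qi, some ci, some cim =>
      let nextCoefficient := qi * ci + cim
      if isPenultimateCoefficient then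
        findXYCoefficients listOfQuotients (listOfCoefficients ++ [nextCoefficient]) (iterator + 1)
          (finalListOfCoefficients ++ [nextCoefficient])
      else if isLastCoefficient then
        let f' := finalListOfCoefficients ++ [nextCoefficient]
        if n % 2 == 0 then pyNegAtA f' 0 else pyNegAtA f' 1
      else
        findXYCoefficients listOfQuotients (listOfCoefficients ++ [nextCoefficient]) (iterator + 1)
          finalListOfCoefficients
    | _, _, _ => []  -- IndexError
termination_by ((listOfQuotients.length : Int) + 1 - iterator).toNat
decreasing_by
  all_goals have := pyGet?_int_some_bounds hq; omega

-- ===== PORT B =====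
-- one loop step: nxt = q[j]*c[j] + c[j-1]; penultimate append to final; c.append(nxt)
def altStep (q : List Int) (n : Int) (st : Option (List Int × List Int)) (j : Int) :
    Option (List Int × List Int) :=
  match st with
  | none => none
  | some (c, f) =>
    match PySem.List.pyGet? q j with
    | none => none  -- IndexError
    | some a =>
      match PySem.List.pyGet? c j with
      | none => none  -- IndexError
      | some b =>
        match PySem.List.pyGet? c (j - 1) with
        | none => none  -- IndexError
        | some d =>
          let nxt := a * b + d
          some (c ++ [nxt], if j == n - 2 then f ++ [nxt] else f)

-- B-side `f[i] *= -1` (same Python statement in Source B; none = IndexError, ported as [])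
def altNegAt (f : List Int) (i : Nat) : List Int :=
  match f[i]? with
  | none => []
  | some v => f.set i (v * -1)

-- after the loop: last coefficient, append, sign flip at final[n % 2]
def altFinish (q : List Int) (n : Int) (st : Option (List Int × List Int)) : List Int :=
  match st with
  | none => []
  | some (c, f) =>
    match PySem.List.pyGet? q (n - 1) with
    | none => []  -- IndexError
    | some a =>
      match PySem.List.pyGet? c (n - 1) with
      | none => []  -- IndexError
      | some b =>
        match PySem.List.pyGet? c (n - 2) with
        | none => []  -- IndexError
        | some d => altNegAt (f ++ [a * b + d]) (n % 2).toNat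

def findXYCoefficients_alt (listOfQuotients : List Int) (listOfCoefficients : List Int) (iterator : Int) (finalListOfCoefficients : List Int) : List Int :=
  let n : Int := listOfQuotients.length
  let init : Option (Int × List Int × List Int) :=
    if listOfCoefficients == [1] then
      match PySem.List.pyGet? listOfQuotients iterator with
      | none => none  -- IndexError
      | some qi =>
        let c' := listOfCoefficients ++ [qi]
        let f' := if iterator == n - 2 then finalListOfCoefficients ++ [qi]
                  else if iterator == n - 1 then finalListOfCoefficients ++ [-qi]
                  else finalListOfCoefficients
        some (iterator + 1, c', f')
    else some (iterator, listOfCoefficients, finalListOfCoefficients)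
  match init with
  | none => []
  | some (it1, c1, f1) =>
    altFinish listOfQuotients n
      ((PySem.List.pyRange it1 (n - 1) 1).foldl (altStep listOfQuotients n) (some (c1, f1)))

-- ===== PRECONDITION & SPEC =====
-- Pre_ is exactly the set of inputs on which Python A returns normally (elsewhere it raises
-- IndexError): nonempty quotient list, iterator within the window in which every q[·]/c[·]/c[·-1]
-- access along the run is in range, and a nonempty final list when the odd-length last-step
-- flip touches final[1].
def Pre_findXYCoefficients (listOfQuotients : List Int) (listOfCoefficients : List Int) (iterator : Int) (finalListOfCoefficients : List Int) : Prop :=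
  let n : Int := listOfQuotients.length
  1 ≤ n ∧
  (if listOfCoefficients = [1] then
      -2 ≤ iterator ∧ iterator ≤ 0 ∧ -n ≤ iterator ∧ iterator ≤ n - 2
    else
      1 - (listOfCoefficients.length : Int) ≤ iterator ∧
      iterator < (listOfCoefficients.length : Int) ∧
      -n ≤ iterator ∧ iterator ≤ n - 1 ∧
      (n % 2 = 1 → iterator = n - 1 → finalListOfCoefficients ≠ []))
instance (listOfQuotients : List Int) (listOfCoefficients : List Int) (iterator : Int) (finalListOfCoefficients : List Int) : Decidable (Pre_findXYCoefficients listOfQuotients listOfCoefficients iterator finalListOfCoefficients) := by unfold Pre_findXYCoefficients; infer_instance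

def pvWitness_findXYCoefficients : List Int × List Int × Int × List Int := ([3, 2, 4], [1], 0, [])

def Spec_findXYCoefficients (listOfQuotients : List Int) (listOfCoefficients : List Int) (iterator : Int) (finalListOfCoefficients : List Int) (out : List Int) : Prop := out = findXYCoefficients_alt listOfQuotients listOfCoefficients iterator finalListOfCoefficients
instance (listOfQuotients : List Int) (listOfCoefficients : List Int) (iterator : Int) (finalListOfCoefficients : List Int) (out : List Int) : Decidable (Spec_findXYCoefficients listOfQuotients listOfCoefficients iterator finalListOfCoefficients out) := by unfold Spec_findXYCoefficients; infer_instance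

-- ===== CLAIM (what is proved, stated in full; the proofs are below) =====
def Claim_equal_findXYCoefficients : Prop := ∀ (listOfQuotients : List Int) (listOfCoefficients : List Int) (iterator : Int) (finalListOfCoefficients : List Int), Dom_findXYCoefficients listOfQuotients listOfCoefficients iterator finalListOfCoefficients → Pre_findXYCoefficients listOfQuotients listOfCoefficients iterator finalListOfCoefficients → Spec_findXYCoefficients listOfQuotients listOfCoefficients iterator finalListOfCoefficients (findXYCoefficients listOfQuotients listOfCoefficients iterator finalListOfCoefficients)

-- ===== LEMMAS AND PROOFS =====

lemma foldl_altStep_none (q : List Int) (n : Int) (l : List Int) :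
    l.foldl (altStep q n) none = none := by
  induction l with
  | nil => rfl
  | cons x xs ih => simpa [altStep] using ih

-- main alignment: in the general phase (c ≠ [1], iterator ≤ n-1), A's recursion equals
-- B's fold-then-finish over pyRange iterator (n-1) 1
lemma gen_align (q : List Int) :
    ∀ (k : Nat) (c f : List Int) (it : Int),
      ((q.length : Int) - 1 - it).toNat = k → c ≠ [1] → it ≤ (q.length : Int) - 1 →
      findXYCoefficients q c it f =
        altFinish q q.length
          ((PySem.List.pyRange it ((q.length : Int) - 1) 1).foldl (altStep q q.length)
            (some (c, f))) := by
  intro k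
  induction k with
  | zero =>
    intro c f it hk hne hle
    have hit : it = (q.length : Int) - 1 := by omega
    subst hit
    rw [PySem.List.pyRange_one_eq_nil (by omega)]
    rw [findXYCoefficients]
    simp only [List.foldl_nil]
    have hbeq : (c == [1]) = false := by simpa using hne
    rw [if_neg (by simp [hbeq])]
    cases h1 : PySem.List.pyGet? q ((q.length : Int) - 1) with
    | none => simp [altFinish, h1]
    | some a =>
      cases h2 : PySem.List.pyGet? c ((q.length : Int) - 1) with
      | none => simp [altFinish, h1, h2]
      | some b =>
        cases h3 : PySem.List.pyGet? c ((q.length : Int) - 1 - 1) with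
        | none =>
          simp only [altFinish, h1, h2]
          rw [show (q.length : Int) - 2 = (q.length : Int) - 1 - 1 by ring]
          simp [h3]
        | some d =>
          have hpen : ((q.length : Int) - 2 == (q.length : Int) - 1) = false := by
            simp only [beq_eq_false_iff_ne]; omega 
          have hlast : ((q.length : Int) - 1 == (q.length : Int) - 1) = true := by simp
          simp only [altFinish, h1, h2, hpen, hlast]
          rw [show (q.length : Int) - 2 = (q.length : Int) - 1 - 1 by ring]
          simp only [h3, Bool.false_eq_true, if_false, if_true]
          by_cases hpar : (q.length : Int) % 2 = 0
          · simp [hpar, pyNegAtA, altNegAt]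
          · have h1' : (q.length : Int) % 2 = 1 := by omega
            simp [h1', pyNegAtA, altNegAt]
  | succ k ih =>
    intro c f it hk hne hle
    have hlt : it < (q.length : Int) - 1 := by omega
    rw [PySem.List.pyRange_one_cons hlt, List.foldl_cons]
    rw [findXYCoefficients]
    have hbeq : (c == [1]) = false := by simpa using hne
    rw [if_neg (by simp [hbeq])]
    cases h1 : PySem.List.pyGet? q it with
    | none => simp [altStep, h1, foldl_altStep_none, altFinish]
    | some a =>
      cases h2 : PySem.List.pyGet? c it with
      | none => simp [altStep, h1, h2, foldl_altStep_none, altFinish]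
      | some b =>
        cases h3 : PySem.List.pyGet? c (it - 1) with
        | none => simp [altStep, h1, h2, h3, foldl_altStep_none, altFinish]
        | some d =>
          have hlast : ((q.length : Int) - 1 == it) = false := by simp only [beq_eq_false_iff_ne]; omega 
          have hcne : c ≠ [] := by
            intro hnil; subst hnil
            simp [PySem.List.pyGet?, PySem.List.pyIdx?] at h2
          have hne' : c ++ [a * b + d] ≠ [1] := by
            intro hh
            have := congrArg List.length hh
            simp at this
            cases c <;> simp_all
          simp only [altStep, h1, h2, h3, hlast, Bool.false_eq_true, if_false]
          by_cases hpen : it = (q.length : Int) - 2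
          · have hpA : ((q.length : Int) - 2 == it) = true := by simp [hpen]
            have hpB : (it == (q.length : Int) - 2) = true := by simp [hpen]
            simp only [hpA, hpB, if_true]
            exact ih _ _ _ (by omega) hne' (by omega)
          · have hpA : ((q.length : Int) - 2 == it) = false := by simp only [beq_eq_false_iff_ne]; omega 
            have hpB : (it == (q.length : Int) - 2) = false := by simp [hpen]
            simp only [hpA, hpB, Bool.false_eq_true, if_false]
            exact ih _ _ _ (by omega) hne' (by omega)

theorem findXYCoefficients_spec : Claim_equal_findXYCoefficients := by
  intro q c it f _hDom hPre
  unfold Pre_findXYCoefficients at hPre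
  simp only at hPre
  unfold Spec_findXYCoefficients findXYCoefficients_alt
  simp only
  by_cases hc : c = [1]
  · rw [if_pos hc] at hPre
    obtain ⟨hn, h1, h2, h3, h4⟩ := hPre
    have hbeq : (c == [1]) = true := by simp [hc]
    rw [findXYCoefficients]
    rw [if_pos (by simp [hbeq]), if_pos (by simp [hbeq])]
    cases hg : PySem.List.pyGet? q it with
    | none => rfl
    | some qi =>
      simp only [mul_one]
      have hA : (if ((q.length : Int) - 2 == it) = true then f ++ [qi]
                 else if ((q.length : Int) - 1 == it) = true then f ++ [qi * (-1)] else f)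
              = (if (it == (q.length : Int) - 2) = true then f ++ [qi]
                 else if (it == (q.length : Int) - 1) = true then f ++ [-qi] else f) := by
        by_cases hp : it = (q.length : Int) - 2
        · simp [hp]
        · by_cases hl : it = (q.length : Int) - 1
          · have : ((q.length : Int) - 2 == it) = false := by
              simp only [beq_eq_false_iff_ne]; omega
            simp [hl]
          · have h2' : ((q.length : Int) - 2 == it) = false := by
              simp only [beq_eq_false_iff_ne]; exact fun h => hp h.symm
            have h1' : ((q.length : Int) - 1 == it) = false := by
              simp only [beq_eq_false_iff_ne]; exact fun h => hl h.symm
            simp [h2', h1', hp, hl]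
      rw [hA]
      have hne' : c ++ [qi] ≠ [1] := by
        subst hc; intro hh; exact absurd (congrArg List.length hh) (by simp)
      exact gen_align q _ _ _ (it + 1) rfl hne' (by omega)
  · rw [if_neg hc] at hPre
    obtain ⟨hn, h1, h2, h3, h4, h5⟩ := hPre
    have hbeq : (c == [1]) = false := by simpa using hc
    rw [if_neg (by simp [hbeq])]
    exact gen_align q _ _ _ it rfl hc (by omega)
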